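-- pv_equiv track=rewrite | github.com/chyjuls/EDX_Python-Fundamentals | DictProblemSets.py | modify_dict
-- ===== SOURCE A (Python) =====
-- def modify_dict(my_dict):
--     my_list = []
--     for last_name, first_name in my_dict.items():
--         if last_name.islower():
--             my_list.append(last_name)
--         else:
--             pass
--     for item in my_list:
--         del my_dict[item]
--     return my_dict
--
-- my_dict = {'Joshua': 'Diaddigo', 'joyner': 'David', 'Elliott': 'jackie', 'murrell': 'marguerite'}
-- ===== SOURCE B (Python) =====
-- def modify_dict(my_dict):
--     # Destructively consume the dict back-to-front with popitem() onto a stack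
--     # (keeping only non-lowercase keys), then rebuild the now-empty dict by
--     # popping the stack, which restores the surviving keys' original order.
--     stack = []
--     while my_dict:
--         k, v = my_dict.popitem()
--         if not k.islower():
--             stack.append((k, v))
--     while stack:
--         k, v = stack.pop()
--         my_dict[k] = v
--     return my_dict
-- ===== Notes on version B (the rewrite author's own statement) =====
-- stated objective: alternative
-- what changed: Instead of A's forward pass collecting lowercase keys into a list and deleting them one by one, B empties the dict back-to-front with popitem() onto a LIFO stack of surviving entries and then rebuilds the dict by popping the stack, restoring the original order of the kept keys; the caller's dict is still mutated in place.
import Mathlib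
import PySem

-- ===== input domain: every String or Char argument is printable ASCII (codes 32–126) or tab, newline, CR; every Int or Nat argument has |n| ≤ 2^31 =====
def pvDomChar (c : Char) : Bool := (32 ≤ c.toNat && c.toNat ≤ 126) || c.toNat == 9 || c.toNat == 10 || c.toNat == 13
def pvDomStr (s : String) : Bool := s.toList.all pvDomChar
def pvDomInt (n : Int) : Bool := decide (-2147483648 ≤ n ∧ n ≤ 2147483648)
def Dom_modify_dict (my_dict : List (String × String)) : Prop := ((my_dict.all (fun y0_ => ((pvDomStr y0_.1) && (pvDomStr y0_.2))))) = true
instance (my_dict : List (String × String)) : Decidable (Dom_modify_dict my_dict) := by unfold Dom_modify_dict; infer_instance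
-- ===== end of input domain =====

-- B empties the dict back-to-front with popitem() onto a stack of kept entries, then rebuilds
-- it by popping the stack, instead of A's forward collect-lowercase-keys-then-delete; same
-- return value and same final mutated state of the argument.


-- ===== PORT A =====
-- str.islower(): at least one cased character and no uppercase cased character;
-- exact on the ASCII domain (Dom_modify_dict), where cased = letters.
def pyStrIslower (s : String) : Bool :=
  s.toList.any PySem.Chars.islower && !(s.toList.any PySem.Chars.isupper)

-- A: collect the lowercase keys into a list, then delete each from the dict.
def modify_dict (my_dict : List (String × String)) : List (String × String) :=
  let my_list := my_dict.foldl
    (fun acc p => if pyStrIslower p.1 then acc ++ [p.1] else acc) []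
  (my_list.foldl (fun d item => PySem.Dict.erase d item) (PySem.Dict.mk my_dict)).items

-- ===== PORT B =====
-- Phase 1: 'while my_dict: k,v = my_dict.popitem(); if not k.islower(): stack.append((k,v))'.
-- popitem removes the LAST entry, so the loop consumes the items back-to-front: we recurse
-- over the reversed item list (each step handles the current last entry).
def bPhase1 : List (String × String) → List (String × String) → List (String × String)
  | [], stack => stack
  | p :: rest, stack =>
      bPhase1 rest (if !pyStrIslower p.1 then stack ++ [p] else stack)

-- Phase 2: 'while stack: k,v = stack.pop(); my_dict[k] = v' — pop the stack's last entry
-- and insert it into the (now empty) dict; we recurse over the reversed stack.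
def bPhase2 : List (String × String) → PySem.Dict String String → PySem.Dict String String
  | [], d => d
  | p :: rest, d => bPhase2 rest (PySem.Dict.insert d p.1 p.2)

def modify_dict_alt (my_dict : List (String × String)) : List (String × String) :=
  let stack := bPhase1 my_dict.reverse []
  (bPhase2 stack.reverse PySem.Dict.empty).items

-- ===== PRECONDITION & SPEC =====
-- The argument is a Python dict, whose keys are necessarily distinct; an association
-- list with duplicate keys does not represent any dict, so it is excluded.
def Pre_modify_dict (my_dict : List (String × String)) : Prop :=
  (my_dict.map Prod.fst).Nodup

instance (my_dict : List (String × String)) : Decidable (Pre_modify_dict my_dict) := by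
  unfold Pre_modify_dict; infer_instance

def pvWitness_modify_dict : (List (String × String)) :=
  [("Joshua", "Diaddigo"), ("joyner", "David"), ("Elliott", "jackie"), ("murrell", "marguerite")]

def Spec_modify_dict (my_dict : List (String × String)) (out : List (String × String)) : Prop := out = modify_dict_alt my_dict
instance (my_dict : List (String × String)) (out : List (String × String)) : Decidable (Spec_modify_dict my_dict out) := by unfold Spec_modify_dict; infer_instance

-- ===== CLAIM (what is proved, stated in full; the proofs are below) =====
def Claim_equal_modify_dict : Prop := ∀ (my_dict : List (String × String)), Dom_modify_dict my_dict → Pre_modify_dict my_dict → Spec_modify_dict my_dict (modify_dict my_dict)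

-- ===== LEMMAS AND PROOFS =====

-- A's first loop produces exactly the lowercase keys, in order.
theorem myList_eq (l : List (String × String)) (acc : List String) :
    l.foldl (fun acc p => if pyStrIslower p.1 then acc ++ [p.1] else acc) acc
      = acc ++ (l.filter (fun p => pyStrIslower p.1)).map Prod.fst := by
  induction l generalizing acc with
  | nil => simp
  | cons p t ih =>
    by_cases h : pyStrIslower p.1 = true <;>
      simp [h, ih, List.append_assoc]

-- Deleting a list of keys = filtering out every entry whose key is in the list.
theorem eraseFold (ks : List String) (l : List (String × String)) :
    (ks.foldl (fun d item => PySem.Dict.erase d item) (PySem.Dict.mk l)).items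
      = l.filter (fun p => ks.all (fun k => !(p.1 == k))) := by
  induction ks generalizing l with
  | nil => simp
  | cons k t ih =>
    simp only [List.foldl_cons]
    have h1 : PySem.Dict.erase (PySem.Dict.mk l) k
        = PySem.Dict.mk (l.filter (fun p => !(p.1 == k))) := rfl
    rw [h1, ih, List.filter_filter]
    apply List.filter_congr
    intro p _
    simp [List.all_cons, Bool.and_comm]

-- Phase 1 appends exactly the kept (non-lowercase) entries, in traversal order.
theorem bPhase1_eq (l stack : List (String × String)) :
    bPhase1 l stack = stack ++ l.filter (fun p => !pyStrIslower p.1) := by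
  induction l generalizing stack with
  | nil => simp [bPhase1]
  | cons p t ih =>
    by_cases h : pyStrIslower p.1 = true <;>
      simp [bPhase1, h, ih, List.append_assoc]

-- Phase 2 is a left fold of inserts.
theorem bPhase2_eq (l : List (String × String)) (d : PySem.Dict String String) :
    bPhase2 l d = l.foldl (fun d p => PySem.Dict.insert d p.1 p.2) d := by
  induction l generalizing d with
  | nil => rfl
  | cons p t ih => simp [bPhase2, ih]

-- Inserting distinct fresh keys into the empty dict appends them.
theorem insertFold_items (l : List (String × String)) (hnd : (l.map Prod.fst).Nodup) :
    (l.foldl (fun d p => PySem.Dict.insert d p.1 p.2) PySem.Dict.empty).items = l := by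
  have := PySem.Dict.items_foldl_insert_fresh (l := l) (k := Prod.fst) (v := Prod.snd)
    (d := PySem.Dict.empty) (by intro a _; simp) hnd
  simpa using this

-- ===== VERDICT (by name: the statement is the Claim_ definition above) =====
theorem modify_dict_spec : Claim_equal_modify_dict := by
  intro l _ hnd
  unfold Spec_modify_dict modify_dict modify_dict_alt
  dsimp only
  have hfnd : ((l.filter (fun p => !pyStrIslower p.1)).map Prod.fst).Nodup := by
    have hsub : List.Sublist ((l.filter (fun p => !pyStrIslower p.1)).map Prod.fst)
        (l.map Prod.fst) := List.Sublist.map Prod.fst List.filter_sublist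
    exact hnd.sublist hsub
  rw [myList_eq, List.nil_append, eraseFold, bPhase1_eq, List.nil_append,
      ← List.filter_reverse, List.reverse_reverse, bPhase2_eq, insertFold_items _ hfnd]
  apply List.filter_congr
  intro p hp
  by_cases h : pyStrIslower p.1 = true
  · have hmem : p.1 ∈ (l.filter (fun p => pyStrIslower p.1)).map Prod.fst :=
      List.mem_map_of_mem (List.mem_filter.mpr ⟨hp, h⟩)
    simp only [h, Bool.not_true]
    rw [List.all_eq_false]
    exact ⟨p.1, hmem, by simp⟩
  · simp only [Bool.not_eq_true] at h
    simp only [h, Bool.not_false]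
    rw [List.all_eq_true]
    intro k hk
    obtain ⟨q, hq, hq1⟩ := List.mem_map.mp hk
    have hq' := List.mem_filter.mp hq
    simp only [Bool.not_eq_eq_eq_not, Bool.not_true, beq_eq_false_iff_ne, ne_eq]
    intro he
    have hqp : p = q :=
      List.inj_on_of_nodup_map hnd hp hq'.1 (by rw [he, hq1])
    rw [hqp, hq'.2] at h
    simp at h
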